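-- pv_equiv track=rewrite | github.com/mmestrov2000/poker-bots-playground | backend/app/bots/manifest.py | select_manifest_member
-- ===== SOURCE A (Python) =====
-- BOT_MANIFEST_NAME = "bot.json"
--
-- def select_manifest_member(names: list[str]) -> tuple[str | None, str | None]:
--     candidates = _select_named_members(names, BOT_MANIFEST_NAME)
--     if not candidates:
--         return None, f"{BOT_MANIFEST_NAME} must exist at zip root or one top-level folder"
--     if BOT_MANIFEST_NAME in candidates:
--         return BOT_MANIFEST_NAME, None
--
--     single_folder_candidates = [name for name in candidates if len([p for p in name.split("/") if p]) == 2]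
--     if len(single_folder_candidates) == 1:
--         return single_folder_candidates[0], None
--     if len(single_folder_candidates) > 1:
--         return None, f"Archive contains multiple {BOT_MANIFEST_NAME} candidates"
--
--     return None, f"{BOT_MANIFEST_NAME} must exist at zip root or one top-level folder"
--
-- def _select_named_members(names: list[str], filename: str) -> list[str]:
--     candidates: list[str] = []
--     for name in names:
--         if name.endswith("/"):
--             continue
--         parts = [p for p in name.split("/") if p]
--         if parts and parts[-1] == filename:
--             candidates.append(name)
--     return candidates
-- ===== SOURCE B (Python) =====
-- BOT_MANIFEST_NAME = "bot.json"
--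
-- def select_manifest_member(names: list[str]) -> tuple[str | None, str | None]:
--     must_msg = f"{BOT_MANIFEST_NAME} must exist at zip root or one top-level folder"
--     any_candidate = False
--     root_found = False
--     folder_matches: list[str] = []
--     for name in names:
--         if name.endswith("/"):
--             continue
--         parts = [p for p in name.split("/") if p]
--         if not parts or parts[-1] != BOT_MANIFEST_NAME:
--             continue
--         any_candidate = True
--         if name == BOT_MANIFEST_NAME:
--             root_found = True
--         elif len(parts) == 2:
--             folder_matches.append(name)
--     if not any_candidate:
--         return None, must_msg
--     if root_found:
--         return BOT_MANIFEST_NAME, None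
--     if len(folder_matches) == 1:
--         return folder_matches[0], None
--     if len(folder_matches) > 1:
--         return None, f"Archive contains multiple {BOT_MANIFEST_NAME} candidates"
--     return None, must_msg
-- ===== Notes on version B (the rewrite author's own statement) =====
-- stated objective: simpler
-- what changed: Replaces the helper that materialises a candidates list plus two subsequent filtering passes with a single pass over names that maintains three pieces of state (any-candidate flag, root-found flag, list of depth-2 matches), deciding afterwards by precedence.
import Mathlib
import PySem

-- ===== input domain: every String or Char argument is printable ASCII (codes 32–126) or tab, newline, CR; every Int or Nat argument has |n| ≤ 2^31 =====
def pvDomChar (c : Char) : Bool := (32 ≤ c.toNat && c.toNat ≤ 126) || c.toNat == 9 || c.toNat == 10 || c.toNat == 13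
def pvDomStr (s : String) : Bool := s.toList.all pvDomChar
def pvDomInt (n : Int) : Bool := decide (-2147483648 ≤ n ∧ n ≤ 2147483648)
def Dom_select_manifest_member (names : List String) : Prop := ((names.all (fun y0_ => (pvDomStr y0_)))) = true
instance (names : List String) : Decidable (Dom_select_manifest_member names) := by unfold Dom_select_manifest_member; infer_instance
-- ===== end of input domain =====

-- B replaces the helper + two subsequent filtering passes over the candidate list by a
-- single pass over `names` maintaining (any-candidate flag, root-found flag, depth-2 matches).

-- ===== PORT A =====
-- parts = [p for p in name.split("/") if p]
def pvParts (name : String) : List String :=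
  ((PySem.Str.split? name "/").getD []).filter (fun p => !(p == ""))

-- loop body of _select_named_members
def pvStepA (filename : String) (acc : List String) (name : String) : List String :=
  if PySem.Str.endswith name "/" then acc
  else
    match (pvParts name).getLast? with
    | none => acc
    | some l => if l == filename then acc ++ [name] else acc

-- _select_named_members(names, filename)
def pvSelNamed (names : List String) (filename : String) : List String :=
  names.foldl (pvStepA filename) []

def select_manifest_member (names : List String) : Option String × Option String :=
  let candidates := pvSelNamed names "bot.json"
  if candidates.isEmpty then
    (none, some "bot.json must exist at zip root or one top-level folder")
  else if candidates.contains "bot.json" then (some "bot.json", none)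
  else
    let sfc := candidates.filter (fun name => (pvParts name).length == 2)
    if sfc.length == 1 then (sfc.head?, none)
    else if 1 < sfc.length then (none, some "Archive contains multiple bot.json candidates")
    else (none, some "bot.json must exist at zip root or one top-level folder")

-- ===== PORT B =====
-- state: (any_candidate, root_found, folder_matches)
def pvStepB (st : Bool × Bool × List String) (name : String) : Bool × Bool × List String :=
  if PySem.Str.endswith name "/" then st
  else
    let parts := pvParts name
    match parts.getLast? with
    | none => st
    | some l =>
      if l == "bot.json" then
        (true,
         st.2.1 || (name == "bot.json"),
         if name == "bot.json" then st.2.2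
         else if parts.length == 2 then st.2.2 ++ [name] else st.2.2)
      else st

def select_manifest_member_alt (names : List String) : Option String × Option String :=
  let st := names.foldl pvStepB (false, false, [])
  if !st.1 then (none, some "bot.json must exist at zip root or one top-level folder")
  else if st.2.1 then (some "bot.json", none)
  else if st.2.2.length == 1 then (st.2.2.head?, none)
  else if 1 < st.2.2.length then (none, some "Archive contains multiple bot.json candidates")
  else (none, some "bot.json must exist at zip root or one top-level folder")

-- ===== PRECONDITION & SPEC =====
def Spec_select_manifest_member (names : List String) (out : Option String × Option String) : Prop := out = select_manifest_member_alt names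
instance (names : List String) (out : Option String × Option String) : Decidable (Spec_select_manifest_member names out) := by unfold Spec_select_manifest_member; infer_instance

-- ===== CLAIM (what is proved, stated in full; the proofs are below) =====
def Claim_equal_select_manifest_member : Prop := ∀ (names : List String), Dom_select_manifest_member names → Spec_select_manifest_member names (select_manifest_member names)

-- ===== LEMMAS AND PROOFS =====

-- B's folder predicate, expressed on a single name
def pvPB (name : String) : Bool := !(name == "bot.json") && ((pvParts name).length == 2)

theorem pvStepA_append (fn : String) (acc : List String) (n : String) :
    pvStepA fn acc n = acc ++ pvStepA fn [] n := by
  unfold pvStepA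
  split
  · simp
  · split
    · simp
    · split <;> simp

theorem pvSelNamed_cons (fn n : String) (ns : List String) :
    pvSelNamed (n :: ns) fn = pvStepA fn [] n ++ pvSelNamed ns fn := by
  have key : ∀ (l : List String) (acc : List String),
      l.foldl (pvStepA fn) acc = acc ++ l.foldl (pvStepA fn) [] := by
    intro l
    induction l with
    | nil => simp
    | cons x xs ih =>
      intro acc
      simp only [List.foldl_cons]
      rw [ih (pvStepA fn acc x), ih (pvStepA fn [] x), pvStepA_append, List.append_assoc]
  simp only [pvSelNamed, List.foldl_cons]
  rw [key ns (pvStepA fn [] n), pvStepA_append]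

theorem pvStepB_char (st : Bool × Bool × List String) (n : String) :
    pvStepB st n =
      (st.1 || !(pvStepA "bot.json" [] n).isEmpty,
       st.2.1 || (pvStepA "bot.json" [] n).contains "bot.json",
       st.2.2 ++ (pvStepA "bot.json" [] n).filter pvPB) := by
  unfold pvStepB pvStepA
  split
  · simp
  · cases h : (pvParts n).getLast? with
    | none => simp [h]
    | some l =>
      simp only [h]
      by_cases hl : l = "bot.json"
      · subst hl
        by_cases hn : n = "bot.json"
        · subst hn
          simp [pvPB]
        · simp [hn, Ne.symm hn]
          split <;> rename_i h2 <;> simp [pvPB, hn, h2]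
      · simp [hl]

theorem pvFoldB_char (ns : List String) : ∀ (a r : Bool) (f : List String),
    ns.foldl pvStepB (a, r, f) =
      (a || !(pvSelNamed ns "bot.json").isEmpty,
       r || (pvSelNamed ns "bot.json").contains "bot.json",
       f ++ (pvSelNamed ns "bot.json").filter pvPB) := by
  induction ns with
  | nil => intro a r f; simp [pvSelNamed]
  | cons n ns ih =>
    intro a r f
    simp only [List.foldl_cons, pvStepB_char, pvSelNamed_cons]
    rw [ih]
    generalize pvStepA "bot.json" [] n = d
    cases d with
    | nil => simp
    | cons x xs =>
      simp only [List.cons_append, List.filter_cons]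
      split <;> simp [Bool.or_assoc, List.filter_append]

theorem pvFilter_eq (c : List String) (h : c.contains "bot.json" = false) :
    c.filter pvPB = c.filter (fun name => (pvParts name).length == 2) := by
  apply List.filter_congr
  intro x hx
  have hxne : x ≠ "bot.json" := by
    intro heq; subst heq
    have h' : ("bot.json" : String) ∉ c := by simpa using h
    exact h' hx
  simp [pvPB, hxne]

-- ===== VERDICT (by name: the statement is the Claim_ definition above) =====
theorem select_manifest_member_spec : Claim_equal_select_manifest_member := by
  intro names _
  unfold Spec_select_manifest_member select_manifest_member select_manifest_member_alt
  rw [pvFoldB_char]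
  simp only [Bool.false_or, List.nil_append]
  by_cases he : (pvSelNamed names "bot.json").isEmpty
  · simp [he]
  · have he' : (pvSelNamed names "bot.json").isEmpty = false := by
      simpa using he
    by_cases hc : (pvSelNamed names "bot.json").contains "bot.json"
    · have hm : ("bot.json" : String) ∈ pvSelNamed names "bot.json" := by
        simpa using hc
      simp [he', hm]
    · have hc' : (pvSelNamed names "bot.json").contains "bot.json" = false := by
        simpa using hc
      have hm' : ("bot.json" : String) ∉ pvSelNamed names "bot.json" := by
        simpa using hc'
      rw [pvFilter_eq _ hc']
      simp [he', hm']
      rfl
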